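-- pv_equiv track=rewrite | github.com/NiJingzhe/SimpleCADAPI | src/simplecadapi/auto_tools/make_export.py | generate_constraints_imports
-- ===== SOURCE A (Python) =====
-- from typing import Dict, List, Mapping, Sequence, Tuple
--
-- TAIL_CONSTRAINT_FUNCTIONS = ("stack",)
--
-- CONSTRAINTS_CLASS_ORDER = (
--     "Assembly",
--     "AssemblyResult",
--     "SolveReport",
--     "PartHandle",
--     "PointAnchor",
--     "AxisAnchor",
-- )
--
-- def ordered_constraint_classes(classes: Sequence[str]) -> List[str]:
--     priority = {name: index for index, name in enumerate(CONSTRAINTS_CLASS_ORDER)}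
--     return sorted(classes, key=lambda name: (priority.get(name, len(priority)), name))
--
-- def generate_constraints_imports(
--     functions: Sequence[str], classes: Sequence[str]
-- ) -> str:
--     lines = ["from .constraints import (", "    # 声明式装配约束"]
--
--     tail = sorted(name for name in functions if name in TAIL_CONSTRAINT_FUNCTIONS)
--     head = sorted(name for name in functions if name not in TAIL_CONSTRAINT_FUNCTIONS)
--
--     for name in head:
--         lines.append(f"    {name},")
--     for name in ordered_constraint_classes(classes):
--         lines.append(f"    {name},")
--     for name in tail:
--         lines.append(f"    {name},")
--
--     lines.append(")")
--     return "\n".join(lines)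
-- ===== SOURCE B (Python) =====
-- TAIL_CONSTRAINT_FUNCTIONS = ("stack",)
--
-- CONSTRAINTS_CLASS_ORDER = (
--     "Assembly",
--     "AssemblyResult",
--     "SolveReport",
--     "PartHandle",
--     "PointAnchor",
--     "AxisAnchor",
-- )
--
--
-- def generate_constraints_imports(functions, classes):
--     head = sorted(n for n in functions if n not in TAIL_CONSTRAINT_FUNCTIONS)
--     tail = sorted(n for n in functions if n in TAIL_CONSTRAINT_FUNCTIONS)
--     # table walk: known classes in CONSTRAINTS_CLASS_ORDER order (duplicates kept),
--     # then the unknown ones alphabetically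
--     known = [n for target in CONSTRAINTS_CLASS_ORDER for n in classes if n == target]
--     unknown = sorted(n for n in classes if n not in CONSTRAINTS_CLASS_ORDER)
--     body = "".join(f"    {n},\n" for n in head + known + unknown + tail)
--     return "from .constraints import (\n    # 声明式装配约束\n" + body + ")"
-- ===== Notes on version B (the rewrite author's own statement) =====
-- stated objective: alternative
-- what changed: Replaces the composite-key sort of the classes (priority dict + sorted with (priority, name) key) by a table walk over CONSTRAINTS_CLASS_ORDER collecting known names in order followed by a plain alphabetical sort of the unknown names, and builds the result by joining line fragments instead of accumulating a lines list.
import Mathlib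
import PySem

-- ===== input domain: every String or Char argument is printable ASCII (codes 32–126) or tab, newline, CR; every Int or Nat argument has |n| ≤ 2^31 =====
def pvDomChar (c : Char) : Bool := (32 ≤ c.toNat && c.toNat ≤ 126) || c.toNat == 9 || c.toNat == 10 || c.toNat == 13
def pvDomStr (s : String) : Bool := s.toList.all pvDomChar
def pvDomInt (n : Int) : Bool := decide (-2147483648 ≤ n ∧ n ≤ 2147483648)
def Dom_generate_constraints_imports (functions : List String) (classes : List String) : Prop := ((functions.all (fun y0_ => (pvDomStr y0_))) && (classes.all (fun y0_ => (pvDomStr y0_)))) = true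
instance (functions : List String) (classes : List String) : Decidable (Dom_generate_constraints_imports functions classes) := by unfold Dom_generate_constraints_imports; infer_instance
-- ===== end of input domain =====

-- B replaces the composite-key sort of the classes by a table walk over the known-order list
-- followed by an alphabetical sort of the unknown names, and joins line fragments directly (objective: alternative).


-- ===== PORT A =====
-- TAIL_CONSTRAINT_FUNCTIONS = ("stack",)
def pvTailFns : List String := ["stack"]

-- CONSTRAINTS_CLASS_ORDER
def pvClassOrder : List String :=
  ["Assembly", "AssemblyResult", "SolveReport", "PartHandle", "PointAnchor", "AxisAnchor"]

-- priority = {name: index for index, name in enumerate(CONSTRAINTS_CLASS_ORDER)}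
-- return sorted(classes, key=lambda name: (priority.get(name, len(priority)), name))
def ordered_constraint_classes (classes : List String) : List String :=
  let priority : PySem.Dict String Int :=
    (PySem.List.enumerate pvClassOrder).foldl (fun d p => d.insert p.2 p.1) PySem.Dict.empty
  PySem.List.sorted2 classes
    (fun name => priority.getD name (PySem.Dict.size priority : Int)) (fun name => name)

def generate_constraints_imports (functions : List String) (classes : List String) : String :=
  let lines : List String := ["from .constraints import (", "    # 声明式装配约束"]
  let tail := PySem.List.sorted (functions.filter (fun name => pvTailFns.contains name)) (fun n => n)
  let head := PySem.List.sorted (functions.filter (fun name => !pvTailFns.contains name)) (fun n => n)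
  let lines := head.foldl (fun ls name => ls ++ ["    " ++ name ++ ","]) lines
  let lines := (ordered_constraint_classes classes).foldl (fun ls name => ls ++ ["    " ++ name ++ ","]) lines
  let lines := tail.foldl (fun ls name => ls ++ ["    " ++ name ++ ","]) lines
  let lines := lines ++ [")"]
  PySem.Str.join "\n" lines

-- ===== PORT B =====
def generate_constraints_imports_alt (functions : List String) (classes : List String) : String :=
  let head := PySem.List.sorted (functions.filter (fun n => !pvTailFns.contains n)) (fun n => n)
  let tail := PySem.List.sorted (functions.filter (fun n => pvTailFns.contains n)) (fun n => n)
  let known := pvClassOrder.flatMap (fun target => classes.filter (fun n => n == target))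
  let unknown := PySem.List.sorted (classes.filter (fun n => !pvClassOrder.contains n)) (fun n => n)
  let body := PySem.Str.join "" ((head ++ known ++ unknown ++ tail).map (fun n => "    " ++ n ++ ",\n"))
  "from .constraints import (\n    # 声明式装配约束\n" ++ body ++ ")"

-- ===== PRECONDITION & SPEC =====
def Spec_generate_constraints_imports (functions : List String) (classes : List String) (out : String) : Prop := out = generate_constraints_imports_alt functions classes
instance (functions : List String) (classes : List String) (out : String) : Decidable (Spec_generate_constraints_imports functions classes out) := by unfold Spec_generate_constraints_imports; infer_instance

-- ===== CLAIM (what is proved, stated in full; the proofs are below) =====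
def Claim_equal_generate_constraints_imports : Prop := ∀ (functions : List String) (classes : List String), Dom_generate_constraints_imports functions classes → Spec_generate_constraints_imports functions classes (generate_constraints_imports functions classes)

-- ===== LEMMAS AND PROOFS =====

-- the priority key A's sort uses, written as an if-chain
def priFun (n : String) : Int :=
  if n = "Assembly" then 0 else if n = "AssemblyResult" then 1 else if n = "SolveReport" then 2
  else if n = "PartHandle" then 3 else if n = "PointAnchor" then 4 else if n = "AxisAnchor" then 5 else 6

-- the composite key (priority, name), encoded injectively into one String: a digit char then the name
def pvKey (n : String) : String := String.ofList (Char.ofNat (48 + (priFun n).toNat) :: n.toList)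

lemma priFun_bounds (n : String) : 0 ≤ priFun n ∧ priFun n ≤ 6 := by
  unfold priFun; split_ifs <;> omega

lemma priFun_of_not_mem (n : String) (h : n ∉ pvClassOrder) : priFun n = 6 := by
  simp [pvClassOrder] at h
  unfold priFun
  split_ifs <;> tauto

lemma priFun_of_mem (n : String) (h : n ∈ pvClassOrder) : priFun n < 6 := by
  simp [pvClassOrder] at h
  rcases h with h | h | h | h | h | h <;> subst h <;> decide

lemma priFun_getD (n : String) :
    ((PySem.List.enumerate pvClassOrder).foldl (fun d p => d.insert p.2 p.1)
      (PySem.Dict.empty : PySem.Dict String Int)).getD n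
      ((PySem.Dict.size ((PySem.List.enumerate pvClassOrder).foldl (fun d p => d.insert p.2 p.1)
        (PySem.Dict.empty : PySem.Dict String Int))) : Int) = priFun n := by
  have hd : ((PySem.List.enumerate pvClassOrder).foldl (fun d p => d.insert p.2 p.1)
      (PySem.Dict.empty : PySem.Dict String Int)) = PySem.Dict.mk
      [("Assembly",0),("AssemblyResult",1),("SolveReport",2),("PartHandle",3),("PointAnchor",4),("AxisAnchor",5)] := by rfl
  rw [hd]
  by_cases h1 : n = "Assembly"
  · subst h1; decide
  by_cases h2 : n = "AssemblyResult"
  · subst h2; decide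
  by_cases h3 : n = "SolveReport"
  · subst h3; decide
  by_cases h4 : n = "PartHandle"
  · subst h4; decide
  by_cases h5 : n = "PointAnchor"
  · subst h5; decide
  by_cases h6 : n = "AxisAnchor"
  · subst h6; decide
  simp only [PySem.Dict.getD_eq_get?_getD, PySem.Dict.get?_mk_cons, beq_iff_eq,
    if_neg (Ne.symm h1), if_neg (Ne.symm h2), if_neg (Ne.symm h3), if_neg (Ne.symm h4),
    if_neg (Ne.symm h5), if_neg (Ne.symm h6), priFun, if_neg h1, if_neg h2, if_neg h3,
    if_neg h4, if_neg h5, if_neg h6]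
  rfl

lemma toNat_ofNat_small (m : Nat) (h : m ≤ 54) : (Char.ofNat m).toNat = m := by
  have hv : Nat.isValidChar m := by left; omega
  simp [Char.ofNat, hv]

lemma char_lt_iff (c d : Char) : c < d ↔ c.toNat < d.toNat := by
  rw [Char.lt_def, UInt32.lt_iff_toNat_lt]; rfl

lemma char_eq_of_toNat (c d : Char) (h : c.toNat = d.toNat) : c = d := by
  apply Char.ext; exact UInt32.toNat_inj.mp h

lemma pvKey_lt_iff (a b : String) :
    pvKey a < pvKey b ↔ (priFun a < priFun b ∨ (priFun a = priFun b ∧ a < b)) := by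
  have ha := priFun_bounds a
  have hb := priFun_bounds b
  have hta : (48 + (priFun a).toNat) ≤ 54 := by omega
  have htb : (48 + (priFun b).toNat) ≤ 54 := by omega
  unfold pvKey
  rw [String.lt_iff_toList_lt]
  simp only [String.toList_ofList]
  rw [List.cons_lt_cons_iff]
  rw [char_lt_iff, toNat_ofNat_small _ hta, toNat_ofNat_small _ htb]
  constructor
  · rintro (h | ⟨h, h2⟩)
    · left; omega
    · right
      have : (priFun a).toNat = (priFun b).toNat := by
        have := congrArg Char.toNat h
        rw [toNat_ofNat_small _ hta, toNat_ofNat_small _ htb] at this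
        omega
      exact ⟨by omega, String.lt_iff_toList_lt.mpr h2⟩
  · rintro (h | ⟨h, h2⟩)
    · left; omega
    · right
      refine ⟨char_eq_of_toNat _ _ ?_, String.lt_iff_toList_lt.mp h2⟩
      rw [toNat_ofNat_small _ hta, toNat_ofNat_small _ htb]; omega

lemma pvKey_le_iff (a b : String) :
    pvKey a ≤ pvKey b ↔ (priFun a < priFun b ∨ (priFun a = priFun b ∧ a ≤ b)) := by
  rw [le_iff_lt_or_eq, pvKey_lt_iff]
  constructor
  · rintro ((h | ⟨h, h2⟩) | h)
    · exact Or.inl h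
    · exact Or.inr ⟨h, le_of_lt h2⟩
    · have : a = b := by
        unfold pvKey at h
        have := congrArg String.toList h
        simp only [String.toList_ofList, List.cons.injEq] at this
        exact String.toList_inj.mp this.2
      subst this; exact Or.inr ⟨rfl, le_refl _⟩
  · rintro (h | ⟨h, h2⟩)
    · exact Or.inl (Or.inl h)
    · rcases lt_or_eq_of_le h2 with h3 | h3
      · exact Or.inl (Or.inr ⟨h, h3⟩)
      · subst h3; exact Or.inr rfl

lemma pvKey_inj : Function.Injective pvKey := by
  intro a b h
  unfold pvKey at h
  have := congrArg String.toList h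
  simp only [String.toList_ofList, List.cons.injEq] at this
  exact String.toList_inj.mp this.2

lemma lt_bool_eq (a b : String) :
    (decide (priFun a < priFun b) || (!decide (priFun b < priFun a) && decide (a < b)))
      = decide (pvKey a < pvKey b) := by
  have hk := pvKey_lt_iff a b
  rcases lt_trichotomy (priFun a) (priFun b) with h | h | h
  · have hlt : pvKey a < pvKey b := hk.mpr (Or.inl h)
    simp only [decide_eq_true h, decide_eq_true hlt, Bool.true_or]
  · by_cases h2 : a < b
    · have hlt : pvKey a < pvKey b := hk.mpr (Or.inr ⟨h, h2⟩)
      simp only [h, lt_irrefl, decide_false, decide_eq_true h2, decide_eq_true hlt,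
        Bool.not_false, Bool.true_and, Bool.false_or]
    · have hlt : ¬ pvKey a < pvKey b := by
        intro hc
        rcases hk.mp hc with h' | ⟨_, h'⟩
        · omega
        · exact h2 h'
      simp only [h, lt_irrefl, decide_false, decide_eq_false h2, decide_eq_false hlt,
        Bool.not_false, Bool.true_and, Bool.false_or]
  · have hlt : ¬ pvKey a < pvKey b := by
      intro hc
      rcases hk.mp hc with h' | ⟨h', _⟩ <;> omega
    simp only [decide_eq_false (not_lt_of_gt h), decide_eq_true h, decide_eq_false hlt,
      Bool.not_true, Bool.false_and, Bool.false_or]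

-- A's sorted2 call is a sort by the single injective key pvKey
lemma ordered_eq_sorted_key (classes : List String) :
    ordered_constraint_classes classes = PySem.List.sorted classes pvKey false := by
  unfold ordered_constraint_classes
  simp only [PySem.List.sorted2, PySem.List.sorted, Bool.false_eq_true, if_false]
  have h : (fun a b : String =>
      decide ((((PySem.List.enumerate pvClassOrder).foldl (fun d p => d.insert p.2 p.1)
        (PySem.Dict.empty : PySem.Dict String Int)).getD a
        ((PySem.Dict.size ((PySem.List.enumerate pvClassOrder).foldl (fun d p => d.insert p.2 p.1)
          (PySem.Dict.empty : PySem.Dict String Int))) : Int)) <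
        (((PySem.List.enumerate pvClassOrder).foldl (fun d p => d.insert p.2 p.1)
        (PySem.Dict.empty : PySem.Dict String Int)).getD b
        ((PySem.Dict.size ((PySem.List.enumerate pvClassOrder).foldl (fun d p => d.insert p.2 p.1)
          (PySem.Dict.empty : PySem.Dict String Int))) : Int))) ||
      (!decide ((((PySem.List.enumerate pvClassOrder).foldl (fun d p => d.insert p.2 p.1)
        (PySem.Dict.empty : PySem.Dict String Int)).getD b
        ((PySem.Dict.size ((PySem.List.enumerate pvClassOrder).foldl (fun d p => d.insert p.2 p.1)
          (PySem.Dict.empty : PySem.Dict String Int))) : Int)) <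
        (((PySem.List.enumerate pvClassOrder).foldl (fun d p => d.insert p.2 p.1)
        (PySem.Dict.empty : PySem.Dict String Int)).getD a
        ((PySem.Dict.size ((PySem.List.enumerate pvClassOrder).foldl (fun d p => d.insert p.2 p.1)
          (PySem.Dict.empty : PySem.Dict String Int))) : Int))) && decide (a < b)))
      = fun a b : String => decide (pvKey a < pvKey b) := by
    funext a b
    rw [priFun_getD a, priFun_getD b]
    exact lt_bool_eq a b
  rw [h]

-- a filter by a disjunction of disjoint tests splits, up to permutation
lemma filter_or_disjoint_perm (l : List String) (p q : String → Bool)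
    (hdis : ∀ x, ¬ (p x = true ∧ q x = true)) :
    (l.filter (fun x => p x || q x)).Perm (l.filter p ++ l.filter q) := by
  induction l with
  | nil => simp
  | cons x t ih =>
    by_cases hp : p x = true
    · have hq : q x = false := by
        rcases Bool.eq_false_or_eq_true (q x) with h | h
        · exact absurd ⟨hp, h⟩ (hdis x)
        · exact h
      simp only [List.filter_cons, hp, hq, Bool.true_or, if_pos, List.cons_append]
      simpa using ih.cons x
    · have hp' : p x = false := by simpa using hp
      by_cases hq : q x = true
      · simp only [List.filter_cons, hp', hq, Bool.false_or, if_pos]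
        simpa using (ih.cons x).trans List.perm_middle.symm
      · have hq' : q x = false := by simpa using hq
        simpa [List.filter_cons, hp', hq'] using ih

lemma flatMap_filter_perm (ts : List String) (l : List String) (hnd : ts.Nodup) :
    (ts.flatMap (fun t => l.filter (fun n => n == t))).Perm
      (l.filter (fun n => ts.contains n)) := by
  induction ts with
  | nil => simp
  | cons t ts ih =>
    rcases List.nodup_cons.mp hnd with ⟨hni, hnd'⟩
    have hdis : ∀ x, ¬ ((x == t) = true ∧ (ts.contains x) = true) := by
      intro x ⟨h1, h2⟩
      exact hni (by simpa using (beq_iff_eq.mp h1 ▸ List.contains_iff_mem.mp h2 : t ∈ ts))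
    have hsplit := filter_or_disjoint_perm l (fun n => n == t) (fun n => ts.contains n) hdis
    have hcongr : l.filter (fun n => (t :: ts).contains n)
        = l.filter (fun n => (n == t) || ts.contains n) := by
      apply List.filter_congr
      intro x _
      by_cases hx : x = t <;> simp [hx]
    rw [List.flatMap_cons, hcongr]
    exact ((ih hnd').append_left (l.filter (fun n => n == t))).trans hsplit.symm

lemma B_classes_perm (classes : List String) :
    (pvClassOrder.flatMap (fun target => classes.filter (fun n => n == target)) ++
      PySem.List.sorted (classes.filter (fun n => !pvClassOrder.contains n)) (fun n => n) false).Perm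
      classes := by
  have h1 := flatMap_filter_perm pvClassOrder classes (by decide)
  have h2 := PySem.List.sorted_perm (classes.filter (fun n => !pvClassOrder.contains n)) (fun n => n) false
  exact (h1.append h2).trans (List.filter_append_perm _ classes)

lemma pairwise_key_pvClassOrder :
    pvClassOrder.Pairwise (fun a b => pvKey a ≤ pvKey b) := by
  have h : pvClassOrder.Pairwise (fun a b => priFun a < priFun b) := by
    unfold pvClassOrder priFun; decide
  exact h.imp (fun hab => (pvKey_le_iff _ _).mpr (Or.inl hab))

lemma pairwise_flatMap_blocks {R : String → String → Prop} (ts : List String)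
    (f : String → List String) (hconst : ∀ t, ∀ x ∈ f t, x = t)
    (hrefl : ∀ t, R t t) (hts : ts.Pairwise R) :
    (ts.flatMap f).Pairwise R := by
  induction ts with
  | nil => simp
  | cons t ts ih =>
    rw [List.flatMap_cons, List.pairwise_append]
    rcases List.pairwise_cons.mp hts with ⟨hrel, hts'⟩
    refine ⟨List.pairwise_of_forall_mem_list (fun a ha b hb => ?_), ih hts', ?_⟩
    · rw [hconst t a ha, hconst t b hb]; exact hrefl t
    · intro a ha b hb
      rcases List.mem_flatMap.mp hb with ⟨u, hu, hbu⟩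
      rw [hconst t a ha, hconst u b hbu]
      exact hrel u hu

lemma B_classes_pairwise (classes : List String) :
    (pvClassOrder.flatMap (fun target => classes.filter (fun n => n == target)) ++
      PySem.List.sorted (classes.filter (fun n => !pvClassOrder.contains n)) (fun n => n) false).Pairwise
      (fun a b => pvKey a ≤ pvKey b) := by
  rw [List.pairwise_append]
  refine ⟨?_, ?_, ?_⟩
  · -- the table walk: blocks of equal names, in increasing priority
    refine pairwise_flatMap_blocks pvClassOrder _ ?_ (fun t => le_refl _) pairwise_key_pvClassOrder
    intro t x hx
    simpa using (List.mem_filter.mp hx).2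
  · -- the alphabetical sort of the unknown names
    have hmem : ∀ x ∈ PySem.List.sorted (classes.filter (fun n => !pvClassOrder.contains n)) (fun n => n) false,
        priFun x = 6 := by
      intro x hx
      have := (PySem.List.mem_sorted _ _ _ _).mp hx
      have hnm : ¬ x ∈ pvClassOrder := by
        have := (List.mem_filter.mp this).2
        simpa [List.contains_iff_mem] using this
      exact priFun_of_not_mem x hnm
    refine List.Pairwise.imp_of_mem (fun {a b} ha hb hle => ?_)
      (PySem.List.sorted_pairwise (classes.filter (fun n => !pvClassOrder.contains n)) (fun n => n))
    exact (pvKey_le_iff a b).mpr (Or.inr ⟨by rw [hmem a ha, hmem b hb], hle⟩)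
  · -- every known name precedes every unknown name
    intro a ha b hb
    have hpa : priFun a < 6 := by
      rcases List.mem_flatMap.mp ha with ⟨t, ht, hx⟩
      have : a = t := by simpa using (List.mem_filter.mp hx).2
      exact this ▸ priFun_of_mem t ht
    have hpb : priFun b = 6 := by
      have := (PySem.List.mem_sorted _ _ _ _).mp hb
      have hnm : ¬ b ∈ pvClassOrder := by
        have := (List.mem_filter.mp this).2
        simpa [List.contains_iff_mem] using this
      exact priFun_of_not_mem b hnm
    exact (pvKey_le_iff a b).mpr (Or.inl (by omega))

lemma ordered_eq_known_unknown (classes : List String) :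
    ordered_constraint_classes classes =
      pvClassOrder.flatMap (fun target => classes.filter (fun n => n == target)) ++
        PySem.List.sorted (classes.filter (fun n => !pvClassOrder.contains n)) (fun n => n) false := by
  rw [ordered_eq_sorted_key]
  refine PySem.List.eq_of_perm_of_pairwise_le_of_injective pvKey pvKey_inj ?_ ?_ ?_
  · exact (PySem.List.sorted_perm _ _ _).trans (B_classes_perm classes).symm
  · exact PySem.List.sorted_pairwise _ _
  · exact B_classes_pairwise classes

lemma chars_join_empty_sep (qs : List (List Char)) :
    PySem.Chars.join [] qs = qs.flatten := by
  induction qs with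
  | nil => simp [PySem.Chars.join_nil]
  | cons p qs ih =>
    cases qs with
    | nil => simp [PySem.Chars.join_singleton]
    | cons q qs' => rw [PySem.Chars.join_cons_cons, List.flatten_cons, ih]; simp

lemma chars_join_newline (ps : List (List Char)) (t : List Char) :
    PySem.Chars.join ['\n'] (ps ++ [t]) = (ps.map (fun p => p ++ ['\n'])).flatten ++ t := by
  induction ps with
  | nil => simp [PySem.Chars.join_singleton]
  | cons p ps ih =>
    cases ps with
    | nil => simp [PySem.Chars.join_cons_cons, PySem.Chars.join_singleton]
    | cons q qs =>
      rw [List.cons_append, List.cons_append, PySem.Chars.join_cons_cons, ← List.cons_append, ih]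
      simp

lemma flat_eq (xs : List String) :
    (xs.map ((fun p => p ++ ['\n']) ∘ String.toList ∘ fun n => "    " ++ n ++ ",")).flatten
      = (xs.map (String.toList ∘ fun n => "    " ++ n ++ ",\n")).flatten := by
  induction xs with
  | nil => rfl
  | cons x xs ih =>
    simp only [List.map_cons, List.flatten_cons, Function.comp_apply, String.toList_append,
      List.append_assoc, ih]
    rw [show (",\n".toList : List Char) = ",".toList ++ ['\n'] from by decide]
    simp

lemma join_lines (xs : List String) :
    PySem.Str.join "\n"
      (["from .constraints import (", "    # 声明式装配约束"] ++
        xs.map (fun n => "    " ++ n ++ ",") ++ [")"]) =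
    "from .constraints import (\n    # 声明式装配约束\n" ++
      PySem.Str.join "" (xs.map (fun n => "    " ++ n ++ ",\n")) ++ ")" := by
  apply String.toList_inj.mp
  simp only [String.toList_append, PySem.Str.toList_join, List.map_append, List.map_map,
    List.map_cons, List.map_nil]
  rw [show "\n".toList = ['\n'] from rfl, show "".toList = [] from rfl]
  rw [chars_join_newline, chars_join_empty_sep]
  simp only [List.map_append, List.map_cons, List.map_nil, List.flatten_append, List.flatten_cons,
    List.flatten_nil, List.map_map, List.append_assoc]
  have hpre : "from .constraints import (\n    # 声明式装配约束\n".toList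
      = "from .constraints import (".toList ++ (['\n'] ++ ("    # 声明式装配约束".toList ++ ['\n'])) := by decide
  rw [hpre]
  simp only [List.nil_append, List.append_assoc]
  rw [flat_eq xs]

-- ===== VERDICT (by name: the statement is the Claim_ definition above) =====
theorem generate_constraints_imports_spec : Claim_equal_generate_constraints_imports := by
  intro functions classes _
  unfold Spec_generate_constraints_imports generate_constraints_imports generate_constraints_imports_alt
  simp only [PySem.List.foldl_append_singleton_eq_map, List.append_assoc]
  rw [ordered_eq_known_unknown]
  have hj := join_lines
    ((PySem.List.sorted (functions.filter (fun n => !pvTailFns.contains n)) (fun n => n)) ++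
      ((pvClassOrder.flatMap (fun target => classes.filter (fun n => n == target)) ++
        PySem.List.sorted (classes.filter (fun n => !pvClassOrder.contains n)) (fun n => n)) ++
        (PySem.List.sorted (functions.filter (fun n => pvTailFns.contains n)) (fun n => n))))
  simp only [List.map_append, List.append_assoc, List.cons_append, List.nil_append] at hj ⊢
  exact hj
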